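-- pv_equiv track=rewrite | github.com/kivy-school/kivy-reloader | kivy_reloader/tree_formatter.py | format_file_tree
-- ===== SOURCE A (Python) =====
-- from typing import List, Set, Union
--
-- def format_file_tree(files: Union[Set[str], List[str]], title: str) -> str:
--     """
--     Format a set of file paths as a beautiful tree structure.
--
--     Args:
--         files: Set or list of file paths to format
--         title: Title for the tree section
--
--     Returns:
--         Formatted tree string
--     """
--     if not files:
--         return f'{title}: (empty)'
--
--     # Convert to sorted list and build tree structure
--     sorted_files = sorted(files)
--     tree_lines = [f'{title}:']
--
--     # Group files by directory structure
--     tree_dict = {}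
--     for file_path in sorted_files:
--         parts = file_path.split('/')
--         current = tree_dict
--         for part in parts[:-1]:  # All parts except filename
--             if part not in current:
--                 current[part] = {}
--             current = current[part]
--         # Add the filename
--         current[parts[-1]] = None
--
--     def _build_tree_lines(tree_dict, prefix='', is_last_list=None):
--         """Recursively build tree lines with proper box drawing characters."""
--         if is_last_list is None:
--             is_last_list = []
--
--         items = list(tree_dict.items())
--         lines = []
--
--         for i, (name, subtree) in enumerate(items):
--             is_last = i == len(items) - 1
--
--             # Build the current line prefix
--             current_prefix = ''
--             for is_ancestor_last in is_last_list:
--                 current_prefix += '    ' if is_ancestor_last else '│   '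
--
--             # Add the current item
--             connector = '└── ' if is_last else '├── '
--             lines.append(f'{prefix}{current_prefix}{connector}{name}')
--
--             # If this has children (is a directory), recurse
--             if subtree is not None and subtree:
--                 child_lines = _build_tree_lines(
--                     subtree, prefix, is_last_list + [is_last]
--                 )
--                 lines.extend(child_lines)
--
--         return lines
--
--     tree_lines.extend(_build_tree_lines(tree_dict))
--     return '\n'.join(tree_lines)
-- ===== SOURCE B (Python) =====
-- def format_file_tree(files, title):
--     """Same tree as A, but rendered with an explicit stack (iterative pre-order)
--     instead of recursion, materializing each node's prefix string incrementally."""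
--     if not files:
--         return f'{title}: (empty)'
--
--     # Phase 1: identical grouping of sorted paths into a nested dict (as in A).
--     tree = {}
--     for file_path in sorted(files):
--         parts = file_path.split('/')
--         current = tree
--         for part in parts[:-1]:
--             if part not in current:
--                 current[part] = {}
--             current = current[part]
--         current[parts[-1]] = None
--
--     # Phase 2: iterative rendering with an explicit stack of
--     # (prefix, name, subtree, is_last) frames, children pushed in reverse.
--     out = [f'{title}:']
--     stack = []
--     items = list(tree.items())
--     for i in range(len(items) - 1, -1, -1):
--         name, subtree = items[i]
--         stack.append(('', name, subtree, i == len(items) - 1))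
--     while stack:
--         prefix, name, subtree, is_last = stack.pop()
--         out.append(prefix + ('└── ' if is_last else '├── ') + name)
--         if subtree:
--             child_prefix = prefix + ('    ' if is_last else '│   ')
--             kids = list(subtree.items())
--             for i in range(len(kids) - 1, -1, -1):
--                 kname, ksub = kids[i]
--                 stack.append((child_prefix, kname, ksub, i == len(kids) - 1))
--     return '\n'.join(out)
-- ===== Notes on version B (the rewrite author's own statement) =====
-- stated objective: alternative
-- what changed: The recursive tree renderer (which recomputes each line's indent from the list of ancestor is_last flags) is replaced by an iterative explicit-stack pre-order traversal whose frames carry a materialized prefix string built incrementally; the tree-building phase is kept identical.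
import Mathlib
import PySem

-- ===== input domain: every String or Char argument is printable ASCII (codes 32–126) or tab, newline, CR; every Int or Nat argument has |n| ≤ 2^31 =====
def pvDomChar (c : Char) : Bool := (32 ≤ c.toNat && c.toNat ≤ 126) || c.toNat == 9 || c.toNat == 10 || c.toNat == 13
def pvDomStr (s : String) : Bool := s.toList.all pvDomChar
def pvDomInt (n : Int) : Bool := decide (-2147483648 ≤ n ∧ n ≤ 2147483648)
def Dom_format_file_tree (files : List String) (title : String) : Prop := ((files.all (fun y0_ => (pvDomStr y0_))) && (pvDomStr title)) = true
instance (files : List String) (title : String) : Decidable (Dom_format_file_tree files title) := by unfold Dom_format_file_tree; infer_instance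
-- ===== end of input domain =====

-- B replaces A's recursive tree renderer by an explicit-stack iterative traversal with
-- materialized prefix strings (objective: alternative decomposition, same cost); phase 1
-- (grouping sorted paths into a nested dict) is shared, so both raise TypeError on the
-- same overlapping file/dir inputs, which Pre_ excludes.

-- Shared phase-1 structures (both Pythons build the identical nested dict the same way).
mutual
inductive PTree where
  | none' : PTree
  | dict : PForest → PTree
  deriving DecidableEq, Repr
inductive PForest where
  | nil : PForest
  | cons : String → PTree → PForest → PForest
  deriving DecidableEq, Repr
end

mutual
def sizeT : PTree → Nat
  | .none' => 1
  | .dict f => 1 + sizeF f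
def sizeF : PForest → Nat
  | .nil => 0
  | .cons _ t r => sizeT t + sizeF r
end

theorem sizeT_pos (t : PTree) : 0 < sizeT t := by cases t <;> simp [sizeT]

-- dict membership/lookup (insertion order, first match)
def PForest.find? : PForest → String → Option PTree
  | .nil, _ => none
  | .cons n t r, k => if n = k then some t else PForest.find? r k

-- dict assignment: overwrite in place, else append (insertion order)
def PForest.set : PForest → String → PTree → PForest
  | .nil, k, v => .cons k v .nil
  | .cons n t r, k, v => if n = k then .cons n v r else .cons n t (PForest.set r k v)

-- path.split('/'): the separator "/" is a non-empty literal, so split? never returns none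
def splitSlash (s : String) : List String := (PySem.Str.split? s "/").getD []

-- A's per-path loop: walk parts[:-1] creating {} for missing keys, set parts[-1] to None.
-- Where Python hits a None mid-walk it raises TypeError (excluded by Pre_); the port is
-- totalized there by treating the None as an empty dict.
def insertPath : PForest → List String → PForest
  | f, [] => f                    -- unreachable: str.split never yields []
  | f, [last] => f.set last .none'
  | f, p :: q :: rest =>
      let sub := match f.find? p with
        | some (.dict g) => g
        | _ => PForest.nil
      f.set p (.dict (insertPath sub (q :: rest)))

def buildForest (sortedFiles : List String) : PForest :=
  sortedFiles.foldl (fun acc fp => insertPath acc (splitSlash fp)) PForest.nil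

def PForest.isNil : PForest → Bool
  | .nil => true
  | .cons _ _ _ => false

-- ===== PORT A =====
-- A's recursive _build_tree_lines: prefix is passed unchanged ('' at every call) and the
-- per-line indent is recomputed from is_last_list; is_last = "rest of siblings is empty".
-- The 'and subtree' truthiness guard is a no-op here (recursing into an empty dict yields []).
def renderA : PForest → String → List Bool → List String
  | .nil, _, _ => []
  | .cons name t rest, pfx, lastList =>
      let isLast : Bool := rest.isNil
      let currentPrefix := lastList.foldl (fun acc b => acc ++ (if b then "    " else "│   ")) ""
      let line := pfx ++ currentPrefix ++ (if isLast then "└── " else "├── ") ++ name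
      let childLines := match t with
        | .none' => []
        | .dict g => renderA g pfx (lastList ++ [isLast])
      line :: (childLines ++ renderA rest pfx lastList)
termination_by f _ _ => sizeF f
decreasing_by
  · simp [sizeF, sizeT]; omega
  · have := sizeT_pos t; simp [sizeF]; omega

def format_file_tree (files : List String) (title : String) : String :=
  if files = [] then title ++ ": (empty)"
  else
    let sorted_files := PySem.List.sorted files (fun x => x) false
    let tree := buildForest sorted_files
    PySem.Str.join "\n" ((title ++ ":") :: renderA tree "" [])

-- ===== PORT B =====
-- Source B pushes the siblings of one dict in reverse and pops them one by one; functionally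
-- that is: prepend the frames of the dict, in order, to the remaining stack.
def framesOf (pfx : String) : PForest → List (String × String × PTree × Bool)
  | .nil => []
  | .cons name t rest => (pfx, name, t, rest.isNil) :: framesOf pfx rest

def sizeFrames : List (String × String × PTree × Bool) → Nat
  | [] => 0
  | (_, _, t, _) :: r => sizeT t + sizeFrames r

theorem sizeFrames_append (a b : List (String × String × PTree × Bool)) :
    sizeFrames (a ++ b) = sizeFrames a + sizeFrames b := by
  induction a with
  | nil => simp [sizeFrames]
  | cons h t ih => obtain ⟨_, _, _, _⟩ := h; simp [sizeFrames, ih]; omega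

theorem sizeFrames_framesOf (pfx : String) : (f : PForest) → sizeFrames (framesOf pfx f) = sizeF f
  | .nil => by simp [framesOf, sizeFrames, sizeF]
  | .cons n t r => by simp [framesOf, sizeFrames, sizeF, sizeFrames_framesOf pfx r]

-- Source B's while-loop: pop a frame, emit its line, push non-empty-dict children (reversed).
def runStack : List (String × String × PTree × Bool) → List String
  | [] => []
  | (pfx, name, t, isLast) :: rest =>
      (pfx ++ (if isLast then "└── " else "├── ") ++ name) ::
      (match t with
       | .dict (.cons n c r) =>
          runStack (framesOf (pfx ++ (if isLast then "    " else "│   ")) (.cons n c r) ++ rest)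
       | _ => runStack rest)
termination_by st => sizeFrames st
decreasing_by
  · simp [sizeFrames, sizeFrames_append, sizeFrames_framesOf, sizeF, sizeT]
  · rename_i t; have := sizeT_pos t; simp [sizeFrames]; omega

def format_file_tree_alt (files : List String) (title : String) : String :=
  if files = [] then title ++ ": (empty)"
  else
    let tree := buildForest (PySem.List.sorted files (fun x => x) false)
    PySem.Str.join "\n" ((title ++ ":") :: runStack (framesOf "" tree))

-- ===== PRECONDITION & SPEC =====
-- Pre_ excludes inputs where both Pythons raise TypeError: some path whose '/'-components
-- are a strict prefix of another path's components (a file name reused as a directory).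
def Pre_format_file_tree (files : List String) (_title : String) : Prop :=
  ∀ p ∈ files, ∀ q ∈ files,
    ¬ ((splitSlash p).length < (splitSlash q).length ∧
       (splitSlash q).take (splitSlash p).length = splitSlash p)
instance (files : List String) (title : String) : Decidable (Pre_format_file_tree files title) := by
  unfold Pre_format_file_tree; infer_instance

def pvWitness_format_file_tree : List String × String := (["pkg/main.py", "pkg/util.py", "readme"], "Files")

def Spec_format_file_tree (files : List String) (title : String) (out : String) : Prop := out = format_file_tree_alt files title
instance (files : List String) (title : String) (out : String) : Decidable (Spec_format_file_tree files title out) := by unfold Spec_format_file_tree; infer_instance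

-- ===== CLAIM (what is proved, stated in full; the proofs are below) =====
def Claim_equal_format_file_tree : Prop := ∀ (files : List String) (title : String), Dom_format_file_tree files title → Pre_format_file_tree files title → Spec_format_file_tree files title (format_file_tree files title)

-- ===== LEMMAS AND PROOFS =====

theorem prefA_append_singleton (l : List Bool) (b : Bool) :
    (l ++ [b]).foldl (fun acc b => acc ++ (if b then "    " else "│   ")) ""
      = (l.foldl (fun acc b => acc ++ (if b then "    " else "│   ")) "") ++ (if b then "    " else "│   ") := by
  simp [List.foldl_append]

theorem renderA_nil (pfx : String) (lastList : List Bool) : renderA .nil pfx lastList = [] := by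
  rw [renderA.eq_def]

theorem renderA_cons (name : String) (t : PTree) (rest : PForest) (pfx : String) (lastList : List Bool) :
    renderA (.cons name t rest) pfx lastList =
      (pfx ++ lastList.foldl (fun acc b => acc ++ (if b then "    " else "│   ")) ""
        ++ (if rest.isNil then "└── " else "├── ") ++ name)
      :: ((match t with
           | .none' => []
           | .dict g => renderA g pfx (lastList ++ [rest.isNil])) ++ renderA rest pfx lastList) := by
  rw [renderA.eq_def]

-- The stack renderer, run on the frames of a forest followed by any pending frames,
-- produces exactly A's recursive lines for that forest, then continues with the rest.
theorem run_frames (n : Nat) (g : PForest) (rest : List (String × String × PTree × Bool))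
    (pfx : String) (lst : List Bool)
    (hn : sizeF g + sizeFrames rest ≤ n) :
    runStack (framesOf (pfx ++ lst.foldl (fun acc b => acc ++ (if b then "    " else "│   ")) "") g ++ rest)
      = renderA g pfx lst ++ runStack rest := by
  induction n generalizing g rest pfx lst with
  | zero =>
    cases g with
    | nil => simp [framesOf, renderA_nil]
    | cons name t r => exfalso; have := sizeT_pos t; simp [sizeF] at hn; omega
  | succ n ih =>
    cases g with
    | nil => simp [framesOf, renderA_nil]
    | cons name t r =>
      rw [framesOf, renderA_cons]
      cases t with
      | none' =>
        rw [List.cons_append, runStack]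
        have := ih r rest pfx lst (by simp [sizeF, sizeT] at hn ⊢; omega)
        simp only [this]
        simp
        simp
      | dict g' =>
        cases g' with
        | nil =>
          rw [List.cons_append, runStack]
          have := ih r rest pfx lst (by simp [sizeF, sizeT] at hn ⊢; omega)
          simp only [this, renderA_nil]
          simp
          simp
        | cons n2 c2 r2 =>
          rw [List.cons_append, runStack]
          have h1 := ih (PForest.cons n2 c2 r2) (framesOf (pfx ++ lst.foldl (fun acc b => acc ++ (if b then "    " else "│   ")) "") r ++ rest)
              pfx (lst ++ [r.isNil])
              (by simp [sizeF, sizeT, sizeFrames_append, sizeFrames_framesOf] at hn ⊢; omega)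
          have h2 := ih r rest pfx lst (by simp [sizeF, sizeT] at hn ⊢; omega)
          have hpre : pfx ++ (lst ++ [r.isNil]).foldl (fun acc b => acc ++ (if b then "    " else "│   ")) ""
              = (pfx ++ lst.foldl (fun acc b => acc ++ (if b then "    " else "│   ")) "")
                ++ (if r.isNil then "    " else "│   ") := by
            rw [prefA_append_singleton, String.append_assoc]
          rw [hpre] at h1
          simp only [h1, h2]
          simp

theorem ports_eq (files : List String) (title : String) :
    format_file_tree files title = format_file_tree_alt files title := by
  rw [format_file_tree, format_file_tree_alt]
  by_cases h : files = []
  · simp [h]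
  · simp only [h, if_false]
    have key := run_frames (sizeF (buildForest (PySem.List.sorted files (fun x => x) false)))
        (buildForest (PySem.List.sorted files (fun x => x) false)) [] "" []
        (by simp [sizeFrames])
    simp only [List.foldl_nil, List.append_nil, runStack] at key
    have he : ("" : String) ++ "" = "" := rfl
    rw [he] at key
    simp [key]

-- ===== VERDICT (by name: the statement is the Claim_ definition above) =====
theorem format_file_tree_spec : Claim_equal_format_file_tree := by
  intro files title _ _
  unfold Spec_format_file_tree
  exact ports_eq files title
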